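-- pv_equiv track=rewrite | github.com/DenNagorniy/AI-Unity-Studio | pipeline_optimizer.py | _repeated
-- ===== SOURCE A (Python) =====
-- from typing import Any, Dict, List
--
-- def _repeated(entries: List[dict]) -> bool:
--     count: Dict[str, int] = {}
--     for item in entries:
--         h = item.get("hash")
--         if not h:
--             continue
--         count[h] = count.get(h, 0) + 1
--         if count[h] >= 3:
--             return True
--     return False
-- ===== SOURCE B (Python) =====
-- def _repeated(entries):
--     hs = sorted(h for item in entries if (h := item.get("hash")))
--     return any(a == b for a, b in zip(hs, hs[2:]))
-- ===== Notes on version B (the rewrite author's own statement) =====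
-- stated objective: alternative
-- what changed: Instead of maintaining a running hash->count dict with an early-exit return, B sorts the truthy hashes and scans for an index i with hs[i] == hs[i+2]: in a sorted list a value occurs three or more times exactly when two copies sit two apart.
import Mathlib
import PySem

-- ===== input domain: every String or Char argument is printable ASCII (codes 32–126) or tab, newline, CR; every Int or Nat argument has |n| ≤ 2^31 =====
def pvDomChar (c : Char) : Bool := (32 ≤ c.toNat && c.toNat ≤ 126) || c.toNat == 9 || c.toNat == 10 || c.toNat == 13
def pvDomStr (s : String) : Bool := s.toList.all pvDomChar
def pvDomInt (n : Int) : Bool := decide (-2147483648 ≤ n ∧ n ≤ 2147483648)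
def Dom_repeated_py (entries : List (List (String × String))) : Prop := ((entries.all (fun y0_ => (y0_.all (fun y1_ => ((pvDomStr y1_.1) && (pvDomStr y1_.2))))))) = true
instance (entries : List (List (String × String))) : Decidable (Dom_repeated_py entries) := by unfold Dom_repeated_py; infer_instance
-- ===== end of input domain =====

-- B replaces A's running hash->count dict with early exit by sorting the truthy hashes and
-- scanning for two equal elements two positions apart (alternative algorithm, not faster).

-- ===== PORT A =====
-- the 'for item in entries' loop with the running 'count' dict and the early 'return True'
def repeatedLoopA (count : PySem.Dict String Int) :
    List (List (String × String)) → Bool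
  | [] => false
  | item :: rest =>
    match (PySem.Dict.ofList item).get? "hash" with
    | none => repeatedLoopA count rest                     -- h is None: 'continue'
    | some h =>
      if h = "" then repeatedLoopA count rest              -- h is falsy: 'continue'
      else
        let count' := count.insert h (count.getD h 0 + 1)
        if 3 ≤ count'.getD h 0 then true                   -- early 'return True'
        else repeatedLoopA count' rest

def repeated_py (entries : List (List (String × String))) : Bool :=
  repeatedLoopA PySem.Dict.empty entries

-- ===== PORT B =====
-- 'h for item in entries if (h := item.get("hash"))' : keep only truthy hashes
def truthyHash (o : Option String) : Option String :=
  match o with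
  | none => none
  | some s => if s = "" then none else some s

def repeated_py_alt (entries : List (List (String × String))) : Bool :=
  let hs := PySem.List.sorted
    (entries.filterMap (fun item => truthyHash ((PySem.Dict.ofList item).get? "hash")))
    (fun x => x) false
  (hs.zip (PySem.List.slice hs (some 2) none)).any (fun p => p.1 == p.2)

-- ===== PRECONDITION & SPEC =====
def Spec_repeated_py (entries : List (List (String × String))) (out : Bool) : Prop := out = repeated_py_alt entries
instance (entries : List (List (String × String))) (out : Bool) : Decidable (Spec_repeated_py entries out) := by unfold Spec_repeated_py; infer_instance

-- ===== CLAIM (what is proved, stated in full; the proofs are below) =====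
def Claim_equal_repeated_py : Prop := ∀ (entries : List (List (String × String))), Dom_repeated_py entries → Spec_repeated_py entries (repeated_py entries)

-- ===== LEMMAS AND PROOFS =====

-- the list of truthy hashes of the remaining entries
def hsOf (entries : List (List (String × String))) : List String :=
  entries.filterMap (fun item => truthyHash ((PySem.Dict.ofList item).get? "hash"))

theorem hsOf_cons (item : List (String × String)) (rest : List (List (String × String))) :
    hsOf (item :: rest) =
      (truthyHash ((PySem.Dict.ofList item).get? "hash")).toList ++ hsOf rest := by
  simp [hsOf, List.filterMap_cons]
  cases truthyHash ((PySem.Dict.ofList item).get? "hash") <;> simp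

-- characterisation of A's loop: it returns true iff some truthy hash ends with total count ≥ 3
theorem repeatedLoopA_eq (entries : List (List (String × String)))
    (count : PySem.Dict String Int) :
    repeatedLoopA count entries =
      (hsOf entries).any
        (fun h => decide (3 ≤ count.getD h 0 + (hsOf entries).count h)) := by
  induction entries generalizing count with
  | nil => simp [repeatedLoopA, hsOf]
  | cons item rest ih =>
    rw [hsOf_cons]
    cases hg : (PySem.Dict.ofList item).get? "hash" with
    | none => simp only [repeatedLoopA, hg, truthyHash, Option.toList_none, List.nil_append]; exact ih count
    | some h =>
      by_cases hh : h = ""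
      · simp [repeatedLoopA, hg, hh, truthyHash, ih]
      · have hth : truthyHash (some h) = some h := by simp [truthyHash, hh]
        simp only [repeatedLoopA, hg, if_neg hh, hth, Option.toList_some,
          List.singleton_append, List.any_cons]
        rw [ih]
        rw [PySem.Dict.getD_insert]
        simp only [if_true, List.count_cons_self]
        by_cases h3 : 3 ≤ count.getD h 0 + 1
        · have hc : (0:Int) ≤ (((hsOf rest).count h : Int)) := Int.natCast_nonneg _
          simp [h3]
          exact Or.inl (by omega)
        · rw [if_neg h3]
          rw [Bool.eq_iff_iff]
          simp only [Bool.or_eq_true, List.any_eq_true, decide_eq_true_eq]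
          constructor
          · rintro ⟨g, hg', h3g⟩
            rw [PySem.Dict.getD_insert] at h3g
            by_cases hgh : g = h
            · subst hgh
              exact Or.inl (by simp at h3g ⊢; omega)
            · refine Or.inr ⟨g, hg', ?_⟩
              rw [if_neg hgh] at h3g
              have hne : h ≠ g := fun e => hgh e.symm
              simpa [List.count_cons, hne] using h3g
          · rintro (h3h | ⟨g, hg', h3g⟩)
            · have hcnt : 1 ≤ (hsOf rest).count h := by
                by_contra hc
                have : (hsOf rest).count h = 0 := by omega
                rw [this] at h3h; push_cast at h3h; omega
              refine ⟨h, List.count_pos_iff.mp (by omega), ?_⟩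
              rw [PySem.Dict.getD_insert, if_pos rfl]
              push_cast at h3h ⊢; omega
            · refine ⟨g, hg', ?_⟩
              rw [PySem.Dict.getD_insert]
              by_cases hgh : g = h
              · subst hgh
                rw [if_pos rfl]
                simp only [List.count_cons_self] at h3g
                push_cast at h3g ⊢; omega
              · rw [if_neg hgh]
                have hne : h ≠ g := fun e => hgh e.symm
                simpa [List.count_cons, hne] using h3g

-- in a (≤)-sorted list, two equal elements two apart exist iff some value occurs ≥ 3 times
theorem zip_drop_two_iff (s : List String) (hsrt : s.Pairwise (· ≤ ·)) :
    (s.zip (s.drop 2)).any (fun p => p.1 == p.2) = true ↔ ∃ x, 3 ≤ s.count x := by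
  induction s with
  | nil => simp
  | cons a t ih =>
    cases t with
    | nil =>
      simp only [List.drop, List.zip_nil_right, List.any_nil]
      constructor
      · intro h; cases h
      · rintro ⟨x, hx⟩
        have := List.count_le_length (l := [a]) (a := x)
        simp at this; omega
    | cons b t' =>
      cases t' with
      | nil =>
        simp only [List.drop, List.zip_nil_right, List.any_nil]
        constructor
        · intro h; cases h
        · rintro ⟨x, hx⟩
          have := List.count_le_length (l := [a, b]) (a := x)
          simp at this; omega
      | cons c u =>
        have hab : a ≤ b := (List.pairwise_cons.mp hsrt).1 b (by simp)
        have hac : a ≤ c := (List.pairwise_cons.mp hsrt).1 c (by simp)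
        have htail : (b :: c :: u).Pairwise (· ≤ ·) := (List.pairwise_cons.mp hsrt).2
        have hbc : b ≤ c := (List.pairwise_cons.mp htail).1 c (by simp)
        have hcu : ∀ y ∈ u, c ≤ y :=
          (List.pairwise_cons.mp (List.pairwise_cons.mp htail).2).1
        have hzip : ((a :: b :: c :: u).zip ((a :: b :: c :: u).drop 2))
            = (a, c) :: ((b :: c :: u).zip ((b :: c :: u).drop 2)) := by simp
        rw [hzip, List.any_cons, Bool.or_eq_true, ih htail]
        have hsplit : ∀ x : String, (a :: b :: c :: u).count x =
            (if a = x then 1 else 0) + (b :: c :: u).count x := by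
          intro x; simp [List.count_cons]; split <;> omega
        constructor
        · rintro (hEq | ⟨x, hx⟩)
          · have hac' : a = c := by simpa using hEq
            have hb : b = a := le_antisymm (hac' ▸ hbc) hab
            refine ⟨a, ?_⟩
            have : (a :: b :: c :: u).count a =
                3 + u.count a := by
              simp [hb, hac'.symm]; omega
            omega
          · exact ⟨x, by rw [hsplit x]; omega⟩
        · rintro ⟨x, hx⟩
          by_cases htl : 3 ≤ (b :: c :: u).count x
          · exact Or.inr ⟨x, htl⟩
          · left
            rw [hsplit x] at hx
            have hax : a = x := by by_contra hne; rw [if_neg hne] at hx; omega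
            have hcx : c = x := by
              by_cases hcx : c = x
              · exact hcx
              · -- x must occur in u, and then c ≤ x together with a = x forces c = x
                have hbcsplit : (b :: c :: u).count x =
                    (if b = x then 1 else 0) + (if c = x then 1 else 0) + u.count x := by
                  simp [List.count_cons]; split <;> split <;> omega
                rw [if_neg hcx] at hbcsplit
                have hcnt : 1 ≤ u.count x := by
                  rw [if_pos hax] at hx
                  split at hbcsplit <;> omega
                have hxu : x ∈ u := List.count_pos_iff.mp (by omega)
                exact absurd (le_antisymm (hcu x hxu) (hax ▸ hac)) hcx
            simp [hax, hcx]

-- ===== VERDICT (by name: the statement is the Claim_ definition above) =====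
theorem repeated_py_spec : Claim_equal_repeated_py := by
  intro entries _
  unfold Spec_repeated_py repeated_py repeated_py_alt
  rw [repeatedLoopA_eq]
  have hslice : PySem.List.slice
      (PySem.List.sorted (hsOf entries) (fun x => x) false) (some 2) none
      = (PySem.List.sorted (hsOf entries) (fun x => x) false).drop 2 := by
    have := PySem.List.slice_from_natCast
      (xs := PySem.List.sorted (hsOf entries) (fun x => x) false) (a := 2)
    simpa using this
  show _ = ((PySem.List.sorted (hsOf entries) (fun x => x) false).zip
      (PySem.List.slice (PySem.List.sorted (hsOf entries) (fun x => x) false) (some 2) none)).any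
      (fun p => p.1 == p.2)
  rw [hslice]
  have hperm : (PySem.List.sorted (hsOf entries) (fun x => x) false).Perm (hsOf entries) :=
    PySem.List.sorted_perm _ _ _
  have hcount : ∀ x : String,
      (PySem.List.sorted (hsOf entries) (fun x => x) false).count x = (hsOf entries).count x :=
    fun x => hperm.count_eq x
  rw [Bool.eq_iff_iff,
    zip_drop_two_iff _ (by simpa using PySem.List.sorted_pairwise (hsOf entries) (fun x => x))]
  simp only [List.any_eq_true, decide_eq_true_eq, PySem.Dict.getD_empty, zero_add, hcount]
  constructor
  · rintro ⟨h, hmem, h3⟩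
    exact ⟨h, by exact_mod_cast h3⟩
  · rintro ⟨x, hx⟩
    refine ⟨x, List.count_pos_iff.mp (by omega), ?_⟩
    exact_mod_cast hx
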